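-- pv_equiv track=rewrite | github.com/tyler1zhang/Advanture_of_Code | zengxin/q15/main2.py | cal_score_with_calories
-- ===== SOURCE A (Python) =====
-- def cal_score_with_calories(parameters: list, recipe: list):
--     total_score = 0
--     # get the property to iterate first, for exmaple capcity as the first i, leave the calories
--     properties = len(parameters[0]) - 1
--     total_score = 1
--     for i in range(properties):
--         property_score = 0
--         calories_score = 0
--         for j in range(len(recipe)):
--             property_score += parameters[j][i] * recipe[j]
--             calories_score += parameters[j][len(parameters[0]) - 1] * recipe[j]
--         if property_score < 0:
--             property_score = 0
--         elif calories_score != 500: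
--             property_score = 0
--         total_score *= property_score
--     return total_score
-- ===== SOURCE B (Python) =====
-- def cal_score_with_calories(parameters: list, recipe: list):
--     # One accumulation pass over the recipe maintaining a score vector plus a
--     # single calories total, then a separate clamp-and-multiply reduction.
--     props = len(parameters[0]) - 1
--     scores = [0] * props if props > 0 else []
--     calories = 0
--     if props > 0:
--         for j in range(len(recipe)):
--             row = parameters[j]
--             x = recipe[j]
--             scores = [s + p * x for s, p in zip(scores, row)]
--             calories += row[props] * x
--     total = 1
--     for s in scores:
--         total *= 0 if s < 0 or calories != 500 else s
--     return total
-- ===== Notes on version B (the rewrite author's own statement) =====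
-- stated objective: alternative
-- what changed: B replaces A's property-outer/recipe-inner nested rescans (which recompute the calorie total once per property) with a single pass over the recipe accumulating a score vector plus one calories total, followed by a separate clamp-and-multiply reduction.
import Mathlib
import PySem

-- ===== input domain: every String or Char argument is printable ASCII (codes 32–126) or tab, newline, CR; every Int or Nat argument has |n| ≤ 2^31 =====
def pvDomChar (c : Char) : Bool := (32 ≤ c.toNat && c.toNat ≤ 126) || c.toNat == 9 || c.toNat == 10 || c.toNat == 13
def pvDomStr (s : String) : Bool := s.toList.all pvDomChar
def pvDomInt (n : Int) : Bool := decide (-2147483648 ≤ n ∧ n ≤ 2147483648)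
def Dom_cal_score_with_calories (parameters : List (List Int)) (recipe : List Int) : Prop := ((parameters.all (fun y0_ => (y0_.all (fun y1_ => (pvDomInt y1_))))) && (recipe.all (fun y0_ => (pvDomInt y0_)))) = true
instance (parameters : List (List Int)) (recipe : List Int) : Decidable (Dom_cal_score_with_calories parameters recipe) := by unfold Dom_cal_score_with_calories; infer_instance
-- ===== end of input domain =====

-- B makes one accumulation pass over the recipe (score vector + single calories total)
-- instead of A's nested property-outer/recipe-inner rescans; return values proved equal on Pre_.

-- ===== PORT A =====
def cal_score_with_calories (parameters : List (List Int)) (recipe : List Int) : Int :=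
  let properties : Int := ((PySem.List.pyGetD parameters 0 []).length : Int) - 1
  (PySem.List.pyRange 0 properties 1).foldl
    (fun total i =>
      let st := (PySem.List.pyRange 0 (recipe.length : Int) 1).foldl
        (fun (st : Int × Int) j =>
          (st.1 + PySem.List.pyGetD (PySem.List.pyGetD parameters j []) i 0 * PySem.List.pyGetD recipe j 0,
           st.2 + PySem.List.pyGetD (PySem.List.pyGetD parameters j []) (((PySem.List.pyGetD parameters 0 []).length : Int) - 1) 0 * PySem.List.pyGetD recipe j 0))
        (0, 0)
      total * (if st.1 < 0 then 0 else if st.2 ≠ 500 then 0 else st.1))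
    1

-- ===== PORT B =====
def cal_score_with_calories_alt (parameters : List (List Int)) (recipe : List Int) : Int :=
  let props : Int := ((PySem.List.pyGetD parameters 0 []).length : Int) - 1
  let init : List Int := if 0 < props then List.replicate props.toNat 0 else []
  let acc : List Int × Int :=
    if 0 < props then
      (PySem.List.pyRange 0 (recipe.length : Int) 1).foldl
        (fun (st : List Int × Int) j =>
          let row := PySem.List.pyGetD parameters j []
          let x := PySem.List.pyGetD recipe j 0
          (List.zipWith (fun s p => s + p * x) st.1 row,
           st.2 + PySem.List.pyGetD row props 0 * x))
        (init, 0)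
    else (init, 0)
  acc.1.foldl (fun total s => total * (if s < 0 || acc.2 ≠ 500 then 0 else s)) 1

-- ===== PRECONDITION & SPEC =====
-- Pre_ excludes exactly the inputs on which A raises IndexError: empty parameters, and
-- (when there are properties) a recipe longer than parameters or a used row shorter than row 0.
def Pre_cal_score_with_calories (parameters : List (List Int)) (recipe : List Int) : Prop :=
  parameters ≠ [] ∧
  (2 ≤ (parameters.headI).length →
    recipe.length ≤ parameters.length ∧
    ∀ row ∈ parameters.take recipe.length, (parameters.headI).length ≤ row.length)
instance (parameters : List (List Int)) (recipe : List Int) : Decidable (Pre_cal_score_with_calories parameters recipe) := by unfold Pre_cal_score_with_calories; infer_instance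

def pvWitness_cal_score_with_calories : List (List Int) × List Int :=
  ([[1, 2, 5], [3, -1, 5]], [50, 50])

def Spec_cal_score_with_calories (parameters : List (List Int)) (recipe : List Int) (out : Int) : Prop := out = cal_score_with_calories_alt parameters recipe
instance (parameters : List (List Int)) (recipe : List Int) (out : Int) : Decidable (Spec_cal_score_with_calories parameters recipe out) := by unfold Spec_cal_score_with_calories; infer_instance

-- ===== CLAIM (what is proved, stated in full; the proofs are below) =====
def Claim_equal_cal_score_with_calories : Prop := ∀ (parameters : List (List Int)) (recipe : List Int), Dom_cal_score_with_calories parameters recipe → Pre_cal_score_with_calories parameters recipe → Spec_cal_score_with_calories parameters recipe (cal_score_with_calories parameters recipe)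

-- ===== LEMMAS AND PROOFS =====

-- partial sum of column i over the first k recipe entries
def pvS (parameters : List (List Int)) (recipe : List Int) (i : Nat) (k : Nat) : Int :=
  ((List.range k).map (fun j => (parameters.getD j []).getD i 0 * recipe.getD j 0)).sum

theorem pv_foldl_mul (h : Int → Int) (l : List Int) : ∀ (a : Int),
    l.foldl (fun t i => t * h i) a = a * (l.map h).prod := by
  induction l with
  | nil => intro a; simp
  | cons x t ih => intro a; simp [List.foldl, ih, mul_assoc]

theorem pv_foldl_pair_add (f g : Int → Int) : ∀ (k : Nat) (a b : Int),
    (PySem.List.pyRange 0 (k : Int) 1).foldl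
      (fun (st : Int × Int) j => (st.1 + f j, st.2 + g j)) (a, b)
    = (a + ((List.range k).map (fun j => f (j : Int))).sum,
       b + ((List.range k).map (fun j => g (j : Int))).sum) := by
  intro k
  induction k with
  | zero => intro a b; simp [PySem.List.pyRange_one_eq_nil]
  | succ k ih =>
    intro a b
    have h : ((k : Int) + 1) = ((k + 1 : Nat) : Int) := by push_cast; ring
    rw [← h, PySem.List.pyRange_one_succ_right (by positivity), List.foldl_append, ih,
      List.range_succ]
    simp [add_assoc]

theorem pv_zipWith_map_range (g : Int → Int → Int) (f : Nat → Int) (m : Nat)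
    (row : List Int) (h : m ≤ row.length) :
    List.zipWith g ((List.range m).map f) row
      = (List.range m).map (fun i => g (f i) (row.getD i 0)) := by
  apply List.ext_getElem
  · simp [h]
  · intro i h1 h2
    simp at h1
    have : i < row.length := lt_of_lt_of_le h1.1 h
    simp [List.getD, this]

theorem pv_B_invariant (parameters : List (List Int)) (recipe : List Int)
    (m : Nat)
    (hrows : ∀ j < recipe.length, m + 1 ≤ (parameters.getD j []).length) :
    ∀ (k : Nat), k ≤ recipe.length →
    (PySem.List.pyRange 0 (k : Int) 1).foldl
      (fun (st : List Int × Int) j =>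
        let row := PySem.List.pyGetD parameters j []
        let x := PySem.List.pyGetD recipe j 0
        (List.zipWith (fun s p => s + p * x) st.1 row,
         st.2 + PySem.List.pyGetD row ((m : Int)) 0 * x))
      (List.replicate m 0, 0)
    = ((List.range m).map (fun i => pvS parameters recipe i k),
       pvS parameters recipe m k) := by
  intro k
  induction k with
  | zero =>
    intro _
    simp [PySem.List.pyRange_one_eq_nil, pvS]
  | succ k ih =>
    intro hk
    have hk' : k ≤ recipe.length := Nat.le_of_succ_le hk
    have h : ((k : Int) + 1) = ((k + 1 : Nat) : Int) := by push_cast; ring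
    rw [← h, PySem.List.pyRange_one_succ_right (by positivity), List.foldl_append, ih hk']
    have hrow : m + 1 ≤ (parameters.getD k []).length := hrows k (by omega)
    simp only [List.foldl_cons, List.foldl_nil, PySem.List.pyGetD_natCast]
    rw [pv_zipWith_map_range _ _ m _ (by omega)]
    simp [pvS, List.range_succ]

theorem pv_clamp_eq (s c : Int) :
    (if s < 0 then (0:Int) else if c ≠ 500 then 0 else s)
      = (if s < 0 || c ≠ 500 then 0 else s) := by
  by_cases h1 : s < 0 <;> by_cases h2 : c = 500 <;> simp [h1, h2]

-- ===== VERDICT (by name: the statement is the Claim_ definition above) =====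
theorem cal_score_with_calories_spec : Claim_equal_cal_score_with_calories := by
  intro parameters recipe _dom hpre
  obtain ⟨hne, hrest⟩ := hpre
  unfold Spec_cal_score_with_calories
  cases parameters with
  | nil => exact absurd rfl hne
  | cons p0 ps =>
    simp only [List.headI] at hrest
    by_cases hL : 2 ≤ p0.length
    · obtain ⟨hlen, hrows⟩ := hrest hL
      obtain ⟨m, hmeq, hm1⟩ : ∃ m : Nat, p0.length = m + 1 ∧ 1 ≤ m :=
        ⟨p0.length - 1, by omega, by omega⟩
      have hcast : ((p0.length : Int)) - 1 = (m : Int) := by omega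
      have hrows' : ∀ j < recipe.length, m + 1 ≤ (((p0 :: ps) : List (List Int)).getD j []).length := by
        intro j hj
        have hjlen : j < (p0 :: ps).length := lt_of_lt_of_le hj hlen
        rw [List.getD_eq_getElem _ _ hjlen]
        have hmem : (p0 :: ps)[j] ∈ (p0 :: ps).take recipe.length := by
          have h1 : j < ((p0 :: ps).take recipe.length).length := by
            rw [List.length_take]; omega
          have h2 := List.getElem_mem h1
          rw [List.getElem_take] at h2
          exact h2
        have := hrows _ hmem
        omega
      have hA : cal_score_with_calories (p0 :: ps) recipe
          = ((List.range m).map (fun i =>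
              if pvS (p0 :: ps) recipe i recipe.length < 0 then (0:Int)
              else if pvS (p0 :: ps) recipe m recipe.length ≠ 500 then 0
              else pvS (p0 :: ps) recipe i recipe.length)).prod := by
        unfold cal_score_with_calories
        simp only [PySem.List.pyGetD_zero_cons, hcast]
        simp only [pv_foldl_pair_add]
        simp only [pv_foldl_mul]
        rw [PySem.List.pyRange_one, one_mul, show ((m : Int) - 0).toNat = m by omega,
          List.map_map]
        apply congrArg List.prod
        apply List.map_congr_left
        intro i _
        simp [pvS, Function.comp_def, PySem.List.pyGetD_natCast, List.getD, ← List.map_eq_flatMap]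
      have hB : cal_score_with_calories_alt (p0 :: ps) recipe
          = ((List.range m).map (fun i =>
              if pvS (p0 :: ps) recipe i recipe.length < 0 ∨ pvS (p0 :: ps) recipe m recipe.length ≠ 500 then (0:Int)
              else pvS (p0 :: ps) recipe i recipe.length)).prod := by
        unfold cal_score_with_calories_alt
        simp only [PySem.List.pyGetD_zero_cons, hcast]
        rw [if_pos (by positivity), if_pos (by positivity)]
        rw [show ((m : Int)).toNat = m from Int.toNat_natCast m]
        rw [pv_B_invariant (p0 :: ps) recipe m hrows' recipe.length le_rfl]
        simp only [pv_foldl_mul, List.map_map]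
        simp [Function.comp_def]
      rw [hA, hB]
      congr 1
      apply List.map_congr_left
      intro i _
      rw [pv_clamp_eq]
      simp
    · have hnil : PySem.List.pyRange 0 (((p0.length : Int)) - 1) 1 = [] :=
        PySem.List.pyRange_one_eq_nil (by omega)
      unfold cal_score_with_calories cal_score_with_calories_alt
      simp only [PySem.List.pyGetD_zero_cons, hnil]
      rw [if_neg (by omega)]
      simp
      rw [if_neg (show ¬ 1 < p0.length by omega)]
      rfl
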